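-- pv_equiv track=rewrite | github.com/Adisha2/45-Days-Code | Day 19 - GRPASSN.py | can_group_people
-- ===== SOURCE A (Python) =====
-- def can_group_people(test_cases):
--     results = []
--     for n, preferences in test_cases:
--         count = {}
--
--         # Count how many people prefer each group size
--         for p in preferences:
--             if p in count:
--                 count[p] += 1
--             else:
--                 count[p] = 1
--
--         # Check if we can form the groups according to their preferences
--         possible = True
--         for size, num_people in count.items():
--             if num_people % size != 0:
--                 possible = False
--                 break
--
--         results.append("YES" if possible else "NO")
--
--     return results
-- ===== SOURCE B (Python) =====
-- def can_group_people(test_cases):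
--     results = []
--     for n, preferences in test_cases:
--         prefs = sorted(preferences)
--         ok = True
--         i = 0
--         m = len(prefs)
--         while i < m:
--             size = prefs[i]
--             j = i
--             while j < m and prefs[j] == size:
--                 j += 1
--             if (j - i) % size != 0:
--                 ok = False
--                 break
--             i = j
--         results.append("YES" if ok else "NO")
--     return results
-- ===== Notes on version B (the rewrite author's own statement) =====
-- stated objective: alternative
-- what changed: Replaced the per-case hash-table counting pass plus dict-items check with a sort-then-run-length scan: sort the preferences, walk consecutive equal runs, and test size-divides-run-length with early exit.
-- outside the precondition, e.g. on can_group_people([(1, [3, 0])]): A returns ['NO'], B raises ZeroDivisionError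
import Mathlib
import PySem

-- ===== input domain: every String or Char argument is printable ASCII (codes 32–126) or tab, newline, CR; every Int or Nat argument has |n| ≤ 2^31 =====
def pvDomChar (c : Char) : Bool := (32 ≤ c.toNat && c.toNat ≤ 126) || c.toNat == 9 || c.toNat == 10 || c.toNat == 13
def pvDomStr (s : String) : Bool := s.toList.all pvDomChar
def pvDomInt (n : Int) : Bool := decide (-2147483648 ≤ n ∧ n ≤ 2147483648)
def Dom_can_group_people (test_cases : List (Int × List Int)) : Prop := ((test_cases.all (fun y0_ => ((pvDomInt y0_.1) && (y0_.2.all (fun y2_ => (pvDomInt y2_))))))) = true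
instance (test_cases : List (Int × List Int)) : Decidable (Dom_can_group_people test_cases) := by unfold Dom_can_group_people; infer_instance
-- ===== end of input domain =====

-- B replaces A's hash-table counting with a sort-then-run-length scan (alternative decomposition, not claimed faster).
-- ===== PORT A =====
-- the 'for size, num_people in count.items(): if num_people % size != 0: possible = False; break' loop
def pvCheckA : List (Int × Int) → Bool
  | [] => true
  | (size, num_people) :: rest =>
    if PySem.Int.mod num_people size ≠ 0 then false else pvCheckA rest

def can_group_people (test_cases : List (Int × List Int)) : List String :=
  test_cases.foldl (fun results tc =>
    let count := tc.2.foldl (fun d p =>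
      if d.contains p then d.insert p (d.getD p 0 + 1) else d.insert p 1)
      PySem.Dict.empty
    let possible := pvCheckA count.items
    results ++ [if possible then "YES" else "NO"]) []

-- ===== PORT B =====
-- the run-scan loop of Source B: takeWhile/dropWhile transcribe the inner 'while j < m and prefs[j] == size' scan
def pvRunCheck : List Int → Bool
  | [] => true
  | x :: xs =>
    if PySem.Int.mod (((xs.takeWhile (fun y => y == x)).length : Int) + 1) x ≠ 0 then false
    else pvRunCheck (xs.dropWhile (fun y => y == x))
termination_by l => l.length
decreasing_by
  have := List.length_dropWhile_le (fun y => y == x) xs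
  simp only [List.length_cons]; omega

def can_group_people_alt (test_cases : List (Int × List Int)) : List String :=
  test_cases.foldl (fun results tc =>
    let prefs := PySem.List.sorted tc.2 (fun v => v) false
    results ++ [if pvRunCheck prefs then "YES" else "NO"]) []

-- ===== PRECONDITION & SPEC =====
-- Pre_ excludes test cases whose preference list contains 0: there Python computes num_people % 0 and
-- raises ZeroDivisionError unless an earlier group size happens to fail first, and WHICH size is checked
-- first is an accident of iteration order (A: first occurrence; B: sorted), so either program may raise.
def Pre_can_group_people (test_cases : List (Int × List Int)) : Prop :=
  ∀ tc ∈ test_cases, (0 : Int) ∉ tc.2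
instance (test_cases : List (Int × List Int)) : Decidable (Pre_can_group_people test_cases) := by unfold Pre_can_group_people; infer_instance
def pvWitness_can_group_people : (List (Int × List Int)) := [(2, [3, 3, 3, 2, 2]), (1, [4])]
def Spec_can_group_people (test_cases : List (Int × List Int)) (out : List String) : Prop := out = can_group_people_alt test_cases
instance (test_cases : List (Int × List Int)) (out : List String) : Decidable (Spec_can_group_people test_cases out) := by unfold Spec_can_group_people; infer_instance

-- ===== CLAIM (what is proved, stated in full; the proofs are below) =====
def Claim_equal_can_group_people : Prop := ∀ (test_cases : List (Int × List Int)), Dom_can_group_people test_cases → Pre_can_group_people test_cases → Spec_can_group_people test_cases (can_group_people test_cases)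

-- ===== LEMMAS AND PROOFS =====

theorem pvCheckA_iff (L : List (Int × Int)) :
    pvCheckA L = true ↔ ∀ p ∈ L, PySem.Int.mod p.2 p.1 = 0 := by
  induction L with
  | nil => simp [pvCheckA]
  | cons hd tl ih =>
    obtain ⟨s, np⟩ := hd
    by_cases h : PySem.Int.mod np s = 0 <;> simp [pvCheckA, h, ih]

-- A's counting fold is the Counter fold
theorem pvFoldA_eq_counter (l : List Int) :
    l.foldl (fun d p => if d.contains p then d.insert p (d.getD p 0 + 1) else d.insert p 1)
      PySem.Dict.empty = PySem.Dict.counter l := by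
  rw [← PySem.Dict.foldl_insert_getD_add_one_eq_counter]
  congr 1
  funext d p
  by_cases h : d.contains p
  · simp [h]
  · have h0 : d.getD p 0 = 0 := by
      unfold PySem.Dict.getD
      rw [(PySem.Dict.get?_eq_none_iff_contains d p).mpr (by simpa using h)]
      rfl
    simp [h, h0]

-- x does not survive dropWhile (== x) in a nondecreasing tail
theorem pv_not_mem_dropWhile (x : Int) (xs : List Int)
    (hp : (x :: xs).Pairwise (· ≤ ·)) : x ∉ xs.dropWhile (fun y => y == x) := by
  induction xs with
  | nil => simp
  | cons y ys ih =>
    rcases List.pairwise_cons.mp hp with ⟨hx, hyys⟩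
    rcases List.pairwise_cons.mp hyys with ⟨hy, hys⟩
    by_cases hxy : (y == x) = true
    · have hyx : y = x := by simpa using hxy
      subst hyx
      simp only [List.dropWhile_cons, hxy, if_true]
      exact ih (List.pairwise_cons.mpr ⟨fun a ha => hx a (List.mem_cons_of_mem _ ha), hys⟩)
    · simp only [List.dropWhile_cons, hxy]
      intro hmem
      rcases List.mem_cons.mp hmem with h | h
      · exact hxy (by simp [h])
      · have h1 : x ≤ y := hx y (List.mem_cons_self ..)
        have h2 : y ≤ x := hy x h
        exact hxy (by simp [le_antisymm h2 h1])

theorem pvRunCheck_iff (l : List Int) (hp : l.Pairwise (· ≤ ·)) :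
    pvRunCheck l = true ↔ ∀ v ∈ l, PySem.Int.mod ((l.count v : Int)) v = 0 := by
  induction l using pvRunCheck.induct with
  | case1 => simp [pvRunCheck]
  | case2 x xs hbad =>
    -- first run fails: whole check is false, and x itself violates the condition
    rw [show pvRunCheck (x :: xs) = false by rw [pvRunCheck]; simp [hbad]]
    have hrun : ∀ y ∈ xs.takeWhile (fun y => y == x), y = x := by
      intro y hy; simpa using List.mem_takeWhile_imp hy
    have hnx : x ∉ xs.dropWhile (fun y => y == x) := pv_not_mem_dropWhile x xs hp
    have hcx : ((x :: xs).count x : Int) = ((xs.takeWhile (fun y => y == x)).length : Int) + 1 := by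
      have hsplit := List.takeWhile_append_dropWhile (p := fun y => y == x) (l := xs)
      have : xs.count x = (xs.takeWhile (fun y => y == x)).length := by
        conv_lhs => rw [← hsplit]
        rw [List.count_append, List.count_eq_zero.mpr hnx,
            List.count_eq_length.mpr (by intro y hy; simp [hrun y hy])]
        omega
      rw [List.count_cons_self]; push_cast [this]; ring
    constructor
    · intro h; exact absurd h (by simp)
    · intro h
      have := h x (List.mem_cons_self ..)
      rw [hcx] at this
      exact absurd this hbad
  | case3 x xs hok ih =>
    have hok0 : PySem.Int.mod (((xs.takeWhile (fun y => y == x)).length : Int) + 1) x = 0 :=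
      not_ne_iff.mp hok
    rw [show pvRunCheck (x :: xs) = pvRunCheck (xs.dropWhile (fun y => y == x)) by
      rw [pvRunCheck]; simp [hok]]
    have hrun : ∀ y ∈ xs.takeWhile (fun y => y == x), y = x := by
      intro y hy; simpa using List.mem_takeWhile_imp hy
    have hnx : x ∉ xs.dropWhile (fun y => y == x) := pv_not_mem_dropWhile x xs hp
    have hsplit := List.takeWhile_append_dropWhile (p := fun y => y == x) (l := xs)
    have hprest : (xs.dropWhile (fun y => y == x)).Pairwise (· ≤ ·) :=
      (List.pairwise_cons.mp hp).2.sublist (List.dropWhile_sublist _)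
    have hcx : ((x :: xs).count x : Int) = ((xs.takeWhile (fun y => y == x)).length : Int) + 1 := by
      have : xs.count x = (xs.takeWhile (fun y => y == x)).length := by
        conv_lhs => rw [← hsplit]
        rw [List.count_append, List.count_eq_zero.mpr hnx,
            List.count_eq_length.mpr (by intro y hy; simp [hrun y hy])]
        omega
      rw [List.count_cons_self]; push_cast [this]; ring
    have hcv : ∀ v : Int, v ≠ x → (x :: xs).count v = (xs.dropWhile (fun y => y == x)).count v := by
      intro v hv
      rw [List.count_cons, if_neg (by simpa using Ne.symm hv)]
      conv_lhs => rw [← hsplit]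
      rw [List.count_append, List.count_eq_zero.mpr (fun hmem => hv (hrun v hmem))]
      omega
    have hmemv : ∀ v : Int, v ≠ x → (v ∈ x :: xs ↔ v ∈ xs.dropWhile (fun y => y == x)) := by
      intro v hv
      constructor
      · intro hmem
        rcases List.mem_cons.mp hmem with h | h
        · exact absurd h hv
        · rw [← hsplit] at h
          rcases List.mem_append.mp h with h | h
          · exact absurd (hrun v h) hv
          · exact h
      · intro h
        exact List.mem_cons_of_mem _ (by rw [← hsplit]; exact List.mem_append_right _ h)
    rw [ih hprest]
    constructor
    · intro h v hv
      by_cases hvx : v = x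
      · subst hvx; rw [hcx]; exact hok0
      · rw [hcv v hvx]; exact h v ((hmemv v hvx).mp hv)
    · intro h v hv
      have hvx : v ≠ x := fun he => hnx (he ▸ hv)
      rw [← hcv v hvx]
      exact h v ((hmemv v hvx).mpr hv)

-- the two per-test-case booleans agree
theorem pv_case_eq (prefs : List Int) :
    pvCheckA (prefs.foldl (fun d p =>
        if d.contains p then d.insert p (d.getD p 0 + 1) else d.insert p 1)
        PySem.Dict.empty).items
      = pvRunCheck (PySem.List.sorted prefs (fun v => v) false) := by
  have hA : pvCheckA (prefs.foldl (fun d p =>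
        if d.contains p then d.insert p (d.getD p 0 + 1) else d.insert p 1)
        PySem.Dict.empty).items = true
      ↔ ∀ v ∈ prefs, PySem.Int.mod ((prefs.count v : Int)) v = 0 := by
    rw [pvFoldA_eq_counter, PySem.Dict.items_counter, pvCheckA_iff]
    constructor
    · intro h v hv
      exact h (v, (prefs.count v : Int)) (List.mem_map.mpr
        ⟨v, (PySem.Set.mem_ofList prefs v).mpr hv, rfl⟩)
    · intro h p hp
      rcases List.mem_map.mp hp with ⟨k, hk, rfl⟩
      exact h k ((PySem.Set.mem_ofList prefs k).mp hk)
  have hpair : (PySem.List.sorted prefs (fun v => v) false).Pairwise (· ≤ ·) := by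
    have := PySem.List.sorted_pairwise (xs := prefs) (key := fun v => v)
    simpa using this
  have hperm : (PySem.List.sorted prefs (fun v => v) false).Perm prefs :=
    PySem.List.sorted_perm ..
  have hB : pvRunCheck (PySem.List.sorted prefs (fun v => v) false) = true
      ↔ ∀ v ∈ prefs, PySem.Int.mod ((prefs.count v : Int)) v = 0 := by
    rw [pvRunCheck_iff _ hpair]
    constructor
    · intro h v hv
      have := h v (hperm.mem_iff.mpr hv)
      rwa [hperm.count_eq] at this
    · intro h v hv
      rw [hperm.count_eq]
      exact h v (hperm.mem_iff.mp hv)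
  have h := hA.trans hB.symm
  by_cases hb : pvRunCheck (PySem.List.sorted prefs (fun v => v) false) = true
  · rw [hb]; exact h.mpr hb
  · rw [Bool.not_eq_true] at hb
    rw [hb]
    by_cases ha : pvCheckA (prefs.foldl (fun d p =>
        if d.contains p then d.insert p (d.getD p 0 + 1) else d.insert p 1)
        PySem.Dict.empty).items = true
    · exact absurd (h.mp ha) (by simp [hb])
    · rwa [Bool.not_eq_true] at ha

theorem pv_fold_eq (tcs : List (Int × List Int)) (acc : List String) :
    tcs.foldl (fun results tc =>
      let count := tc.2.foldl (fun d p =>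
        if d.contains p then d.insert p (d.getD p 0 + 1) else d.insert p 1)
        PySem.Dict.empty
      let possible := pvCheckA count.items
      results ++ [if possible then "YES" else "NO"]) acc
    = tcs.foldl (fun results tc =>
      let prefs := PySem.List.sorted tc.2 (fun v => v) false
      results ++ [if pvRunCheck prefs then "YES" else "NO"]) acc := by
  induction tcs generalizing acc with
  | nil => rfl
  | cons tc rest ih =>
    simp only [List.foldl_cons]
    rw [pv_case_eq tc.2]
    exact ih _

-- ===== VERDICT (by name: the statement is the Claim_ definition above) =====
theorem can_group_people_spec : Claim_equal_can_group_people := by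
  intro tcs _ _
  unfold Spec_can_group_people can_group_people can_group_people_alt
  exact pv_fold_eq tcs []
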